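-- pv_equiv track=rewrite | github.com/franpuch/Algoritmos-y-Estructura-de-Datos-I | Práctica para el Segundo Parcial/2do_C_2023_Tema_B.py | matriz_capicua
-- ===== SOURCE A (Python) =====
-- def reverso (s:list[int]) -> list[int] :
--     res:list[int] = []
--     for i in range ((len(s)-1),-1,-1) :
--         res.append(s[i])
--     return res
--
-- def matriz_capicua (m:list[list[int]]) -> bool :
--     res:bool = True
--
--     if (len(m) == 0) :
--         res = False
--     else :
--         for i in range (0,len(m),1) :
--             if (len(m[i]) == 0) :
--                 res = False
--             else :
--                 lista_reverso:list[int] = reverso (m[i])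
--                 j:int = 0
--                 while (j < len(m[i])) :
--                     if (m[i][j] != lista_reverso[j]) :
--                         res = False
--                     j += 1
--
--     return res
-- ===== SOURCE B (Python) =====
-- def matriz_capicua(m: list[list[int]]) -> bool:
--     if not m:
--         return False
--     for row in m:
--         if not row:
--             return False
--         lo, hi = 0, len(row) - 1
--         while lo < hi:
--             if row[lo] != row[hi]:
--                 return False
--             lo += 1
--             hi -= 1
--     return True
-- ===== Notes on version B (the rewrite author's own statement) =====
-- stated objective: simpler
-- what changed: Replaces the reverso helper (allocating a reversed copy of each row and comparing all n positions) with an in-place two-pointer scan that compares row[lo] with row[hi] toward the center, and returns False immediately on the first failure instead of carrying a flag through the remaining iterations.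
import Mathlib
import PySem

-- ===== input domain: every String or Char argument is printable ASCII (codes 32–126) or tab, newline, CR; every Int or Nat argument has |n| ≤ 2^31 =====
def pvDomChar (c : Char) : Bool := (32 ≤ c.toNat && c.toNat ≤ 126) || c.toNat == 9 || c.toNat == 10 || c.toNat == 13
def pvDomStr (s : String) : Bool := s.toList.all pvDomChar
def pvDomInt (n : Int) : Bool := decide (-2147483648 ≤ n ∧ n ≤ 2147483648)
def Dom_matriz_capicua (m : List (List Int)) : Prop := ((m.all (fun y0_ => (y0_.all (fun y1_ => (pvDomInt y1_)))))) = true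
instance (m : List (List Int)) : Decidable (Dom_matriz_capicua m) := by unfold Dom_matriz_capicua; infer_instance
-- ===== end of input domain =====

-- B replaces the reversed-copy comparison with an in-place two-pointer scan and early exit (same O(n·m) result, no allocation).

-- ===== PORT A =====
-- reverso: builds the reversed list index by index over range(len(s)-1, -1, -1); indices are always in range, so pyGetD is exact here.
def reverso (s : List Int) : List Int :=
  (PySem.List.pyRange ((s.length : Int) - 1) (-1) (-1)).foldl
    (fun res i => res ++ [PySem.List.pyGetD s i 0]) []

-- literal port of A: flag res, for-loop over rows, per nonempty row compares m[i][j] with reverso(m[i])[j] for every j.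
def matriz_capicua (m : List (List Int)) : Bool :=
  if m.length = 0 then false
  else
    (PySem.List.pyRange 0 (m.length : Int) 1).foldl
      (fun res i =>
        let row := PySem.List.pyGetD m i []
        if row.length = 0 then false
        else
          let lista_reverso := reverso row
          (PySem.List.pyRange 0 (row.length : Int) 1).foldl
            (fun r j =>
              if PySem.List.pyGetD row j 0 ≠ PySem.List.pyGetD lista_reverso j 0 then false else r)
            res)
      true

-- ===== PORT B =====
-- two-pointer palindrome scan: compare row[lo] with row[hi], move both inward (Source B's while loop).
def rowPal (row : List Int) (lo hi : Nat) : Bool :=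
  if lo < hi then
    (row.getD lo 0 == row.getD hi 0) && rowPal row (lo + 1) (hi - 1)
  else true
termination_by hi - lo

-- Source B: empty matrix → False; first empty row or first two-pointer mismatch → False (early return = List.all); else True.
def matriz_capicua_alt (m : List (List Int)) : Bool :=
  if m.isEmpty then false
  else m.all (fun row => !row.isEmpty && rowPal row 0 (row.length - 1))

-- ===== PRECONDITION & SPEC =====
def Spec_matriz_capicua (m : List (List Int)) (out : Bool) : Prop := out = matriz_capicua_alt m
instance (m : List (List Int)) (out : Bool) : Decidable (Spec_matriz_capicua m out) := by unfold Spec_matriz_capicua; infer_instance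

-- ===== CLAIM (what is proved, stated in full; the proofs are below) =====
def Claim_equal_matriz_capicua : Prop := ∀ (m : List (List Int)), Dom_matriz_capicua m → Spec_matriz_capicua m (matriz_capicua m)

-- ===== LEMMAS AND PROOFS =====

-- A's per-row check, packaged for the proof (used only by lemmas below).
def rowOKA (row : List Int) : Bool :=
  decide (row ≠ [] ∧ ∀ j : Int, 0 ≤ j → j < (row.length : Int) →
    PySem.List.pyGetD row j 0 = PySem.List.pyGetD (reverso row) j 0)

-- a flag-carrying loop 'if p x: res = False' is res && (no x fails)
theorem foldl_flag {α : Type} (p : α → Prop) [DecidablePred p] (l : List α) (res : Bool) :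
    l.foldl (fun r x => if p x then false else r) res = (res && decide (∀ x ∈ l, ¬ p x)) := by
  induction l generalizing res with
  | nil => simp
  | cons a t ih =>
    rw [List.foldl_cons]
    by_cases h : p a
    · rw [if_pos h, ih]
      simp [h]
    · rw [if_neg h, ih]
      simp [h]

theorem foldl_and_flag {α : Type} (F : Bool → α → Bool) (g : α → Bool)
    (h : ∀ r x, F r x = (r && g x)) (l : List α) (res : Bool) :
    l.foldl F res = (res && l.all g) := by
  induction l generalizing res with
  | nil => simp
  | cons a t ih => simp [List.foldl_cons, h, ih, Bool.and_assoc]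

theorem reverso_eq (s : List Int) : reverso s = s.reverse := by
  unfold reverso
  rw [PySem.List.foldl_append_singleton_eq_map, PySem.List.pyRange_neg_one, List.map_map]
  apply List.ext_getElem
  · simp
  · intro i h1 h2
    simp only [List.nil_append, List.getElem_map, List.getElem_range, Function.comp_apply,
      List.getElem_reverse]
    have hi : i < s.length := by simpa using h2
    rw [PySem.List.pyGetD_eq_getElem s 0 (by omega) (by omega)]
    congr 1
    omega

theorem rowPal_iff_aux (row : List Int) :
    ∀ d lo hi, hi - lo ≤ d → lo + hi = row.length - 1 → hi < row.length →
      (rowPal row lo hi = true ↔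
        ∀ k, lo ≤ k → k ≤ hi → row.getD k 0 = row.getD (row.length - 1 - k) 0) := by
  intro d
  induction d with
  | zero =>
    intro lo hi hle hsum hhi
    have hnlt : ¬ lo < hi := by omega
    rw [rowPal]; simp only [hnlt, if_false, true_iff]
    intro k h1 h2
    have hk : row.length - 1 - k = k := by omega
    rw [hk]
  | succ d ih =>
    intro lo hi hle hsum hhi
    by_cases hlt : lo < hi
    · rw [rowPal]; simp only [hlt, if_true, Bool.and_eq_true, beq_iff_eq]
      rw [ih (lo + 1) (hi - 1) (by omega) (by omega) (by omega)]
      constructor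
      · rintro ⟨heq, hrest⟩ k h1 h2
        by_cases hk1 : k = lo
        · subst hk1
          rw [show row.length - 1 - k = hi by omega]; exact heq
        · by_cases hk2 : k = hi
          · subst hk2
            rw [show row.length - 1 - k = lo by omega]; exact heq.symm
          · exact hrest k (by omega) (by omega)
      · intro H
        refine ⟨?_, fun k h1 h2 => H k (by omega) (by omega)⟩
        have := H lo (le_refl _) (by omega)
        rwa [show row.length - 1 - lo = hi by omega] at this
    · rw [rowPal]; simp only [hlt, if_false, true_iff]
      intro k h1 h2
      rw [show row.length - 1 - k = k by omega]

theorem getD_reverse (l : List Int) (k : Nat) (hk : k < l.length) :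
    l.reverse.getD k 0 = l.getD (l.length - 1 - k) 0 := by
  rw [List.getD_eq_getElem l.reverse 0 (by simpa), List.getD_eq_getElem l 0 (by omega),
    List.getElem_reverse]

theorem rowOKA_eq (row : List Int) :
    rowOKA row = (!row.isEmpty && rowPal row 0 (row.length - 1)) := by
  by_cases hrow : row = []
  · subst hrow; simp [rowOKA]
  · have hn : 0 < row.length := List.length_pos_iff.mpr hrow
    have hiso : ¬ row.isEmpty := by simpa [List.isEmpty_iff] using hrow
    rw [Bool.eq_iff_iff]
    simp only [hiso, Bool.not_false, Bool.true_and, rowOKA, decide_eq_true_eq]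
    rw [rowPal_iff_aux row (row.length - 1) 0 (row.length - 1) (by omega) (by omega) (by omega)]
    constructor
    · rintro ⟨-, H⟩ k h1 h2
      have hklt : k < row.length := by omega
      have := H (k : Int) (by omega) (by omega)
      rw [PySem.List.pyGetD_natCast, PySem.List.pyGetD_natCast, reverso_eq,
        getD_reverse row k hklt] at this
      exact this
    · intro H
      refine ⟨hrow, fun j hj1 hj2 => ?_⟩
      have hjl : j.toNat < row.length := by omega
      have hcast : j = ((j.toNat : Nat) : Int) := by omega
      rw [hcast, PySem.List.pyGetD_natCast, PySem.List.pyGetD_natCast, reverso_eq,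
        getD_reverse row j.toNat hjl]
      exact H j.toNat (by omega) (by omega)

theorem body_eq (res : Bool) (row : List Int) :
    (if row.length = 0 then false
     else (PySem.List.pyRange 0 (row.length : Int) 1).foldl
       (fun r j =>
         if PySem.List.pyGetD row j 0 ≠ PySem.List.pyGetD (reverso row) j 0 then false else r)
       res)
    = (res && rowOKA row) := by
  by_cases h : row.length = 0
  · have : row = [] := List.length_eq_zero_iff.mp h
    subst this
    simp [rowOKA]
  · rw [if_neg h, foldl_flag]
    unfold rowOKA
    congr 1
    rw [decide_eq_decide]
    constructor
    · intro H
      refine ⟨fun he => h (by simp [he]), fun j hj1 hj2 => ?_⟩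
      have := H j (by rw [PySem.List.mem_pyRange_one]; exact ⟨hj1, hj2⟩)
      tauto
    · rintro ⟨-, H⟩ j hj
      rw [PySem.List.mem_pyRange_one] at hj
      simp only [ne_eq, not_not]
      exact H j hj.1 hj.2

-- ===== VERDICT (by name: the statement is the Claim_ definition above) =====
theorem matriz_capicua_spec : Claim_equal_matriz_capicua := by
  intro m _
  unfold Spec_matriz_capicua matriz_capicua matriz_capicua_alt
  by_cases hm : m.length = 0
  · have : m = [] := List.length_eq_zero_iff.mp hm
    subst this
    simp
  · have hiso : ¬ m.isEmpty := by
      simp [List.isEmpty_iff]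
      exact fun he => hm (by simp [he])
    rw [if_neg hm, if_neg hiso]
    exact (PySem.List.foldl_pyRange_zero_pyGetD' m []
        (fun res row =>
          if row.length = 0 then false
          else (PySem.List.pyRange 0 (row.length : Int) 1).foldl
            (fun r j =>
              if PySem.List.pyGetD row j 0 ≠ PySem.List.pyGetD (reverso row) j 0 then false else r)
            res) true).trans
      ((foldl_and_flag _ rowOKA body_eq m true).trans
        ((Bool.true_and _).trans (List.all_congr rfl fun row => rowOKA_eq row)))
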